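-- pv_equiv track=rewrite | github.com/tomislavrupic/HAOS-IIP | archive-pre-refactor/numerics/simulations/stage_c0_16_selector_withdrawal_topology_retention_probe.py | global_read
-- ===== SOURCE A (Python) =====
-- from typing import Any
--
-- def global_read(rows: list[dict[str, Any]]) -> str:
--     locked = [row for row in rows if str(row['locking_after_withdrawal_label']) in {'locked_after_withdrawal', 'quasi_locked_retention'}]
--     afterglow = [row for row in rows if str(row['locking_after_withdrawal_label']) == 'topology_afterglow']
--     if len(locked) >= 3:
--         return 'selector withdrawal leaves a real retained topology signal in several runs, which improves the locking case'
--     if afterglow: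
--         return 'selector withdrawal produces only short-lived afterglow, not stable locking'
--     return 'selected topology collapses once the selector is removed, so the locking case does not improve here'
-- ===== SOURCE B (Python) =====
-- def global_read(rows: list) -> str:
--     locked = 0
--     afterglow = False
--     for row in rows:
--         label = str(row['locking_after_withdrawal_label'])
--         if label == 'topology_afterglow':
--             afterglow = True
--         elif label in ('locked_after_withdrawal', 'quasi_locked_retention'):
--             locked += 1
--             if locked == 3:
--                 return 'selector withdrawal leaves a real retained topology signal in several runs, which improves the locking case'
--     if afterglow:
--         return 'selector withdrawal produces only short-lived afterglow, not stable locking'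
--     return 'selected topology collapses once the selector is removed, so the locking case does not improve here'
-- ===== Notes on version B (the rewrite author's own statement) =====
-- stated objective: alternative
-- what changed: Replaces A's two list-building filter scans plus end-of-scan threshold branch with one streaming pass that keeps a counter and a flag and returns early the moment the third locked label is seen; no intermediate lists are built and the locked decision is made inside the loop, not after it.
import Mathlib
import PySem

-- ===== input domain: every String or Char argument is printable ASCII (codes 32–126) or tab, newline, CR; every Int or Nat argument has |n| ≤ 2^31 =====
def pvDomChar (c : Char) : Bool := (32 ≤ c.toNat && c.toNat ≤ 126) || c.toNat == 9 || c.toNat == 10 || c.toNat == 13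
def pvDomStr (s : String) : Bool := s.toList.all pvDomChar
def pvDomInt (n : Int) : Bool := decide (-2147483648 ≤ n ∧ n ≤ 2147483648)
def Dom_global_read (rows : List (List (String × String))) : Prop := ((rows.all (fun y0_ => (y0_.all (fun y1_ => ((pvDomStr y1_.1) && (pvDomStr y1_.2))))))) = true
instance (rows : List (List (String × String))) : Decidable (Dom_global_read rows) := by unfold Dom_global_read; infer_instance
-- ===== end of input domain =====

-- B: one streaming pass with early exit on the third locked label, instead of A's two
-- list-building filter scans with an end-of-scan threshold branch; return value only.

-- shared accessor: row['locking_after_withdrawal_label'] (values are already strings, so str() is the identity);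
-- the "" default is unreachable under Pre_global_read
def pvLabel (row : List (String × String)) : String :=
  ((PySem.Dict.mk row).get? "locking_after_withdrawal_label").getD ""

-- ===== PORT A =====
def global_read (rows : List (List (String × String))) : String :=
  let locked := rows.filter (fun row =>
    pvLabel row == "locked_after_withdrawal" || pvLabel row == "quasi_locked_retention")
  let afterglow := rows.filter (fun row => pvLabel row == "topology_afterglow")
  if locked.length ≥ 3 then
    "selector withdrawal leaves a real retained topology signal in several runs, which improves the locking case"
  else if afterglow ≠ [] then
    "selector withdrawal produces only short-lived afterglow, not stable locking"
  else
    "selected topology collapses once the selector is removed, so the locking case does not improve here"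

-- ===== PORT B =====
-- the for-loop of Source B with its accumulators (locked, afterglow) and the early return
def globalReadLoop : List (List (String × String)) → Int → Bool → String
  | [], _, afterglow =>
    if afterglow then
      "selector withdrawal produces only short-lived afterglow, not stable locking"
    else
      "selected topology collapses once the selector is removed, so the locking case does not improve here"
  | row :: rest, locked, afterglow =>
    let label := pvLabel row
    if label == "topology_afterglow" then
      globalReadLoop rest locked true
    else if label == "locked_after_withdrawal" || label == "quasi_locked_retention" then
      if locked + 1 == 3 then
        "selector withdrawal leaves a real retained topology signal in several runs, which improves the locking case"
      else
        globalReadLoop rest (locked + 1) afterglow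
    else
      globalReadLoop rest locked afterglow

def global_read_alt (rows : List (List (String × String))) : String :=
  globalReadLoop rows 0 false

-- ===== PRECONDITION & SPEC =====
-- Pre_ excludes rows missing the key 'locking_after_withdrawal_label', on which both Pythons raise KeyError.
def Pre_global_read (rows : List (List (String × String))) : Prop :=
  ∀ row ∈ rows, (PySem.Dict.mk row).contains "locking_after_withdrawal_label" = true
instance (rows : List (List (String × String))) : Decidable (Pre_global_read rows) := by unfold Pre_global_read; infer_instance
def pvWitness_global_read : (List (List (String × String))) :=
  [[("locking_after_withdrawal_label", "topology_afterglow")]]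

def Spec_global_read (rows : List (List (String × String))) (out : String) : Prop := out = global_read_alt rows
instance (rows : List (List (String × String))) (out : String) : Decidable (Spec_global_read rows out) := by unfold Spec_global_read; infer_instance

-- ===== CLAIM =====
def Claim_equal_global_read : Prop := ∀ (rows : List (List (String × String))), Dom_global_read rows → Pre_global_read rows → Spec_global_read rows (global_read rows)

-- ===== LEMMAS AND PROOFS =====

-- invariant of B's loop: with 0 ≤ locked ≤ 2 pending locked labels already counted,
-- the loop returns exactly what A's end-of-scan decision over the remaining rows would.
theorem pv_loop_spec (rows : List (List (String × String))) :
    ∀ (locked : Int) (afterglow : Bool), 0 ≤ locked → locked ≤ 2 →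
    globalReadLoop rows locked afterglow =
      (if 3 ≤ locked + (rows.filter (fun row =>
            pvLabel row == "locked_after_withdrawal" || pvLabel row == "quasi_locked_retention")).length then
        "selector withdrawal leaves a real retained topology signal in several runs, which improves the locking case"
      else if afterglow || rows.any (fun row => pvLabel row == "topology_afterglow") then
        "selector withdrawal produces only short-lived afterglow, not stable locking"
      else
        "selected topology collapses once the selector is removed, so the locking case does not improve here") := by
  induction rows with
  | nil =>
    intro locked afterglow h0 h2
    have hno : ¬ (3 ≤ locked + ((([] : List (List (String × String))).filter (fun row =>
        pvLabel row == "locked_after_withdrawal" || pvLabel row == "quasi_locked_retention")).length : Int)) := by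
      simp; omega
    simp only [globalReadLoop, if_neg hno, List.any_nil, Bool.or_false]
  | cons r rs ih =>
    intro locked afterglow h0 h2
    simp only [globalReadLoop, List.filter_cons, List.any_cons]
    by_cases hag : pvLabel r = "topology_afterglow"
    · have h1 : ¬ pvLabel r = "locked_after_withdrawal" := by simp [hag]
      have hq : ¬ pvLabel r = "quasi_locked_retention" := by simp [hag]
      simp only [hag, beq_self_eq_true, if_pos]
      rw [ih locked true h0 h2]
      simp
    · by_cases hl : (pvLabel r = "locked_after_withdrawal" ∨ pvLabel r = "quasi_locked_retention")
      · have hb : (pvLabel r == "locked_after_withdrawal" || pvLabel r == "quasi_locked_retention") = true := by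
          rcases hl with h | h <;> simp [h]
        simp only [beq_eq_false_iff_ne.mpr hag, Bool.false_or, hb, if_true, List.length_cons]
        by_cases h3 : locked + 1 = 3
        · have hyes : 3 ≤ locked + (((rs.filter (fun row =>
              pvLabel row == "locked_after_withdrawal" || pvLabel row == "quasi_locked_retention")).length + 1 : Nat) : Int) := by
            push_cast; omega
          simp only [h3, if_pos hyes]
          simp
        · have h3' : ¬ (locked + 1 == (3:Int)) = true := by simp [h3]
          rw [if_neg h3', ih (locked + 1) afterglow (by omega) (by omega)]
          have harr : (3 ≤ locked + 1 + (((rs.filter (fun row =>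
              pvLabel row == "locked_after_withdrawal" || pvLabel row == "quasi_locked_retention")).length : Nat) : Int))
              ↔ (3 ≤ locked + (((rs.filter (fun row =>
              pvLabel row == "locked_after_withdrawal" || pvLabel row == "quasi_locked_retention")).length + 1 : Nat) : Int)) := by
            push_cast; omega
          rw [show (if false = true then globalReadLoop rs locked true else
              (if 3 ≤ locked + 1 + (((rs.filter (fun row =>
                pvLabel row == "locked_after_withdrawal" || pvLabel row == "quasi_locked_retention")).length : Nat) : Int) then
                "selector withdrawal leaves a real retained topology signal in several runs, which improves the locking case"
              else if afterglow || rs.any (fun row => pvLabel row == "topology_afterglow") then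
                "selector withdrawal produces only short-lived afterglow, not stable locking"
              else
                "selected topology collapses once the selector is removed, so the locking case does not improve here")) =
              (if 3 ≤ locked + 1 + (((rs.filter (fun row =>
                pvLabel row == "locked_after_withdrawal" || pvLabel row == "quasi_locked_retention")).length : Nat) : Int) then
                "selector withdrawal leaves a real retained topology signal in several runs, which improves the locking case"
              else if afterglow || rs.any (fun row => pvLabel row == "topology_afterglow") then
                "selector withdrawal produces only short-lived afterglow, not stable locking"
              else
                "selected topology collapses once the selector is removed, so the locking case does not improve here") from by simp]
          by_cases hc : 3 ≤ locked + 1 + (((rs.filter (fun row =>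
              pvLabel row == "locked_after_withdrawal" || pvLabel row == "quasi_locked_retention")).length : Nat) : Int)
          · rw [if_pos hc, if_pos (harr.mp hc)]
          · rw [if_neg hc, if_neg (fun h => hc (harr.mpr h))]
      · push Not at hl
        have hb : (pvLabel r == "locked_after_withdrawal" || pvLabel r == "quasi_locked_retention") = false := by
          simp [beq_eq_false_iff_ne.mpr hl.1, beq_eq_false_iff_ne.mpr hl.2]
        simp only [beq_eq_false_iff_ne.mpr hag, hb, Bool.false_or]
        exact ih locked afterglow h0 h2

-- ===== VERDICT =====
theorem global_read_spec : Claim_equal_global_read := by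
  intro rows _ _
  unfold Spec_global_read global_read global_read_alt
  rw [pv_loop_spec rows 0 false le_rfl (by omega)]
  have hne : (rows.filter (fun row => pvLabel row == "topology_afterglow") ≠ [])
      ↔ (rows.any (fun row => pvLabel row == "topology_afterglow")) = true := by
    rw [Ne, List.filter_eq_nil_iff, List.any_eq_true]
    constructor
    · intro h
      by_contra hx
      exact h (fun a ha hpa => hx ⟨a, ha, hpa⟩)
    · rintro ⟨a, ha, hpa⟩ h
      exact h a ha hpa
  by_cases h1 : 3 ≤ (rows.filter (fun row =>
      pvLabel row == "locked_after_withdrawal" || pvLabel row == "quasi_locked_retention")).length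
  · have h1' : 3 ≤ (0:Int) + (((rows.filter (fun row =>
        pvLabel row == "locked_after_withdrawal" || pvLabel row == "quasi_locked_retention")).length : Nat) : Int) := by
      push_cast; omega
    rw [if_pos h1, if_pos h1']
  · have h1' : ¬ (3 ≤ (0:Int) + (((rows.filter (fun row =>
        pvLabel row == "locked_after_withdrawal" || pvLabel row == "quasi_locked_retention")).length : Nat) : Int)) := by
      push_cast; omega
    rw [if_neg h1, if_neg h1', Bool.false_or]
    by_cases h2 : (rows.any (fun row => pvLabel row == "topology_afterglow")) = true
    · rw [if_pos (hne.mpr h2), if_pos h2]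
    · rw [if_neg (fun h => h2 (hne.mp h)), if_neg h2]
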